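-- pv_equiv track=rewrite | github.com/ffancer/study_with_codewars_part2 | 7 kyu Dropcaps.py | drop_cap
-- ===== SOURCE A (Python) =====
-- def drop_cap(str_):
--     s = str_.split(' ')
--     lst = []
--     for i in s:
--         if len(i) > 2:
--             lst.append(i.title())
--         else:
--             lst.append(i)
--     return ' '.join(lst)
-- ===== SOURCE B (Python) =====
-- def drop_cap(str_):
--     # Single pass: copy spaces verbatim, transform each maximal non-space run in place.
--     out = []
--     i, n = 0, len(str_)
--     while i < n:
--         if str_[i] == ' ':
--             out.append(' ')
--             i += 1
--         else:
--             j = i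
--             while j < n and str_[j] != ' ':
--                 j += 1
--             tok = str_[i:j]
--             out.append(tok.title() if j - i > 2 else tok)
--             i = j
--     return ''.join(out)
-- ===== Notes on version B (the rewrite author's own statement) =====
-- stated objective: alternative
-- what changed: B replaces A's split-on-space / build-list / rejoin pipeline with a single in-place scan that copies space characters verbatim and transforms each maximal non-space run via title() as it is found, never materialising the token list or rejoining.
import Mathlib
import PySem

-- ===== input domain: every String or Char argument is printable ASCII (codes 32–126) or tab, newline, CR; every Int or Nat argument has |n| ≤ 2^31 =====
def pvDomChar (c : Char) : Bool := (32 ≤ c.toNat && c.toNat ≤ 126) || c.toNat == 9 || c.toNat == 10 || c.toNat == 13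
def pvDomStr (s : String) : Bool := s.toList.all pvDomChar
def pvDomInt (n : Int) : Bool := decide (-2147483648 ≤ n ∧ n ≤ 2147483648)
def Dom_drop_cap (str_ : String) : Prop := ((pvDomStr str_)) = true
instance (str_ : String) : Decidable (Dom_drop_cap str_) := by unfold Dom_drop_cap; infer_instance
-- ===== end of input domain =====

-- B replaces A's split-on-space / transform / rejoin with a single in-place scan over
-- maximal non-space runs (alternative decomposition, same cost); return values agree on all inputs.

-- Python str.title() on ASCII: a letter after a non-letter is uppercased, a letter
-- after a letter is lowercased, non-letters pass through (shared: both Pythons call .title()).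
def pyTitleGo : Bool → List Char → List Char
  | _, [] => []
  | prev, c :: r =>
    if PySem.Chars.isalpha c then
      (if prev then PySem.Chars.lowerChar c else PySem.Chars.upperChar c) :: pyTitleGo true r
    else c :: pyTitleGo false r

def pyTitle (cs : List Char) : List Char := pyTitleGo false cs

-- ===== PORT A =====
def drop_cap (str_ : String) : String :=
  let s := PySem.Chars.splitOn str_.toList [' ']
  let lst := s.foldl (fun lst i => lst ++ [if i.length > 2 then pyTitle i else i]) []
  String.mk (PySem.Chars.join [' '] lst)

-- ===== PORT B =====
-- B's scanner: a space is copied; otherwise the maximal non-space run starting here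
-- (tok = str_[i:j]) is emitted transformed, and scanning resumes at j.
def pySub : List Char → List Char
  | [] => []
  | c :: rest =>
    if c = ' ' then ' ' :: pySub rest
    else
      let tok := c :: rest.takeWhile (fun x => x ≠ ' ')
      (if tok.length > 2 then pyTitle tok else tok) ++ pySub (rest.dropWhile (fun x => x ≠ ' '))
termination_by cs => cs.length
decreasing_by
  · simp
  · simpa using Nat.lt_succ_of_le (List.length_dropWhile_le _ rest)

def drop_cap_alt (str_ : String) : String := String.mk (pySub str_.toList)

-- ===== PRECONDITION & SPEC =====
def Spec_drop_cap (str_ : String) (out : String) : Prop := out = drop_cap_alt str_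
instance (str_ : String) (out : String) : Decidable (Spec_drop_cap str_ out) := by unfold Spec_drop_cap; infer_instance

-- ===== CLAIM (what is proved, stated in full; the proofs are below) =====
def Claim_equal_drop_cap : Prop := ∀ (str_ : String), Dom_drop_cap str_ → Spec_drop_cap str_ (drop_cap str_)

-- ===== LEMMAS AND PROOFS =====

-- the common per-token transform
def pvG (t : List Char) : List Char := if t.length > 2 then pyTitle t else t

-- reference structural form of Python's split(' ')
def spAux : List Char → List (List Char)
  | [] => [[]]
  | c :: r => if c = ' ' then [] :: spAux r else (spAux r).modifyHead (c :: ·)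

theorem spAux_ne_nil (cs : List Char) : spAux cs ≠ [] := by
  cases cs with
  | nil => simp [spAux]
  | cons c r =>
    simp only [spAux]
    split_ifs
    · simp
    · cases h : spAux r with
      | nil => exact absurd h (spAux_ne_nil r)
      | cons q qs => simp

theorem splitOn_go_nil (fuel : Nat) (cur : List Char) (acc : List (List Char)) :
    PySem.Chars.splitOn.go [' '] (fuel+1) [] cur acc = (cur.reverse :: acc).reverse := by
  simp [PySem.Chars.splitOn.go]

theorem splitOn_go_space (fuel : Nat) (rest cur : List Char) (acc : List (List Char)) :
    PySem.Chars.splitOn.go [' '] (fuel+1) (' '::rest) cur acc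
      = PySem.Chars.splitOn.go [' '] fuel rest [] (cur.reverse :: acc) := by
  rw [PySem.Chars.splitOn.go]
  simp [List.isPrefixOf]

theorem splitOn_go_nonspace (fuel : Nat) (c : Char) (rest cur : List Char) (acc : List (List Char))
    (h : c ≠ ' ') :
    PySem.Chars.splitOn.go [' '] (fuel+1) (c::rest) cur acc
      = PySem.Chars.splitOn.go [' '] fuel rest (c :: cur) acc := by
  rw [PySem.Chars.splitOn.go]
  simp [List.isPrefixOf, Ne.symm h]

theorem splitOn_go_eq (fuel : Nat) : ∀ (l cur : List Char) (acc : List (List Char)),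
    l.length < fuel →
    PySem.Chars.splitOn.go [' '] fuel l cur acc
      = acc.reverse ++ (spAux l).modifyHead (cur.reverse ++ ·) := by
  induction fuel with
  | zero => intro l cur acc h; omega
  | succ fuel ih =>
    intro l cur acc h
    cases l with
    | nil =>
      rw [splitOn_go_nil]
      simp [spAux]
    | cons c rest =>
      by_cases hc : c = ' '
      · subst hc
        rw [splitOn_go_space, ih rest [] ((cur.reverse) :: acc) (by simpa using h)]
        simp only [spAux, List.reverse_cons, List.append_assoc,
          List.singleton_append, List.nil_append, List.reverse_nil]
        cases hs : spAux rest with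
        | nil => simp
        | cons q qs => simp
      · rw [splitOn_go_nonspace fuel c rest cur acc hc,
          ih rest (c :: cur) acc (by simpa using h)]
        simp only [spAux, if_neg hc, List.modifyHead_modifyHead]
        congr 2
        funext x
        simp

theorem splitOn_eq_spAux (cs : List Char) :
    PySem.Chars.splitOn cs [' '] = spAux cs := by
  rw [PySem.Chars.splitOn, splitOn_go_eq (cs.length + 1) cs [] [] (by omega)]
  cases h : spAux cs with
  | nil => exact absurd h (spAux_ne_nil cs)
  | cons q qs => simp

theorem spAux_no_space (t : List Char) (h : ' ' ∉ t) : spAux t = [t] := by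
  induction t with
  | nil => simp [spAux]
  | cons c r ih =>
    have hc : c ≠ ' ' := fun e => h (e ▸ List.mem_cons_self)
    simp only [spAux, if_neg hc, ih (fun m => h (List.mem_cons_of_mem _ m))]
    simp

theorem spAux_append (t r : List Char) (h : ' ' ∉ t) :
    spAux (t ++ ' ' :: r) = t :: spAux r := by
  induction t with
  | nil => simp [spAux]
  | cons c tt ih =>
    have hc : c ≠ ' ' := fun e => h (e ▸ List.mem_cons_self)
    simp only [List.cons_append, spAux, if_neg hc,
      ih (fun m => h (List.mem_cons_of_mem _ m))]
    simp

theorem pySub_cons_ne (c : Char) (r : List Char) (hc : c ≠ ' ') :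
    pySub (c :: r) = pvG (c :: r.takeWhile (fun x => x ≠ ' '))
      ++ pySub (r.dropWhile (fun x => x ≠ ' ')) := by
  rw [pySub]
  simp [hc, pvG]

theorem join_map_spAux (n : Nat) : ∀ (cs : List Char), cs.length ≤ n →
    PySem.Chars.join [' '] ((spAux cs).map pvG) = pySub cs := by
  induction n with
  | zero =>
    intro cs h
    have : cs = [] := List.eq_nil_of_length_eq_zero (Nat.le_zero.mp h)
    subst this
    simp [spAux, pySub, pvG, PySem.Chars.join_singleton]
  | succ n ih =>
    intro cs h
    cases cs with
    | nil => simp [spAux, pySub, pvG, PySem.Chars.join_singleton]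
    | cons c r =>
      by_cases hc : c = ' '
      · subst hc
        rw [show spAux (' ' :: r) = [] :: spAux r from by simp [spAux],
            show pySub (' ' :: r) = ' ' :: pySub r from by rw [pySub]; simp]
        cases hq : spAux r with
        | nil => exact absurd hq (spAux_ne_nil r)
        | cons q qs =>
          have hjoin : PySem.Chars.join [' '] (List.map pvG ([] :: q :: qs))
              = pvG [] ++ [' '] ++ PySem.Chars.join [' '] (List.map pvG (q :: qs)) := by
            simp only [List.map_cons, PySem.Chars.join_cons_cons]
          rw [hjoin, ← hq, ih r (by simpa using h)]
          simp [pvG]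
      · -- cs starts a non-space run
        have htw : (c :: r).takeWhile (fun x => x ≠ ' ') = c :: r.takeWhile (fun x => x ≠ ' ') := by
          simp [hc]
        have hdw : (c :: r).dropWhile (fun x => x ≠ ' ') = r.dropWhile (fun x => x ≠ ' ') := by
          simp [hc]
        have ht : ' ' ∉ (c :: r).takeWhile (fun x => x ≠ ' ') := by
          intro m
          have := List.mem_takeWhile_imp m
          simp at this
        have hcs : (c :: r).takeWhile (fun x => x ≠ ' ') ++ (c :: r).dropWhile (fun x => x ≠ ' ') = c :: r :=
          List.takeWhile_append_dropWhile
        rw [pySub_cons_ne c r hc, ← htw, ← hdw]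
        cases hd : (c :: r).dropWhile (fun x => x ≠ ' ') with
        | nil =>
          have hcs' : c :: r = (c :: r).takeWhile (fun x => x ≠ ' ') := by
            conv_lhs => rw [← hcs, hd]
            simp
          have hspa : spAux (c :: r) = [(c :: r).takeWhile (fun x => x ≠ ' ')] := by
            conv_lhs => rw [hcs']
            exact spAux_no_space _ ht
          rw [hspa]
          simp only [List.map_cons, List.map_nil, PySem.Chars.join_singleton]
          rw [show pySub [] = [] from by rw [pySub]]
          simp
        | cons dh dr =>
          have hdh : dh = ' ' := by
            have hne : (c :: r).dropWhile (fun x => x ≠ ' ') ≠ [] := by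
              rw [hd]; exact List.cons_ne_nil _ _
            have := List.head_dropWhile_not (fun x => x ≠ ' ') hne
            simp only [hd, List.head_cons] at this
            simpa using this
          subst hdh
          have hdec : c :: r = (c :: r).takeWhile (fun x => x ≠ ' ') ++ ' ' :: dr := by
            conv_lhs => rw [← hcs, hd]
          have hspa : spAux (c :: r) = (c :: r).takeWhile (fun x => x ≠ ' ') :: spAux dr := by
            conv_lhs => rw [hdec]
            exact spAux_append _ dr ht
          rw [hspa]
          cases hq : spAux dr with
          | nil => exact absurd hq (spAux_ne_nil dr)
          | cons q qs =>
            have hjoin : PySem.Chars.join [' ']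
                (List.map pvG ((c :: r).takeWhile (fun x => x ≠ ' ') :: q :: qs))
                = pvG ((c :: r).takeWhile (fun x => x ≠ ' ')) ++ [' ']
                  ++ PySem.Chars.join [' '] (List.map pvG (q :: qs)) := by
              simp only [List.map_cons, PySem.Chars.join_cons_cons]
            rw [hjoin, ← hq]
            have hlen : dr.length ≤ n := by
              have h2 : ((c :: r).dropWhile (fun x => x ≠ ' ')).length ≤ r.length + 1 := by
                simpa using List.length_dropWhile_le (fun x => x ≠ ' ') (c :: r)
              rw [hd] at h2
              simp only [List.length_cons] at h2 h
              omega
            rw [ih dr hlen,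
              show pySub (' ' :: dr) = ' ' :: pySub dr from by rw [pySub]; simp]
            simp

-- ===== VERDICT (by name: the statement is the Claim_ definition above) =====
theorem drop_cap_spec : Claim_equal_drop_cap := by
  intro str_ _
  unfold Spec_drop_cap drop_cap drop_cap_alt
  simp only
  rw [PySem.List.foldl_append_singleton_eq_map (fun i => if i.length > 2 then pyTitle i else i)]
  rw [List.nil_append, splitOn_eq_spAux]
  rw [show (fun i : List Char => if i.length > 2 then pyTitle i else i) = pvG from rfl]
  rw [join_map_spAux (str_.toList.length) str_.toList le_rfl]
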